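-- pv_equiv track=rewrite | github.com/FREDY1969/tampa-bay-python-avr | algorithms/depth_first.py | dragon_version
-- ===== SOURCE A (Python) =====
-- import collections
--
-- def dragon_version(G, root):
--     r'''
--         >>> T, DFN = dragon_version(example1, 'a')
--         >>> dump(T, 'a')
--         a
--           b
--             c
--             d
--           e
--             f
--         >>> [x[0] for x in sorted(DFN.items(), key=lambda x: x[1])]
--         ['a', 'e', 'f', 'b', 'd', 'c']
--     '''
--     def search(n, i):
--         visited.add(n)
--         for s in G.get(n, ()):
--             if s not in visited:
--                 T[n].append(s)
--                 i = search(s, i)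
--         DFN[n] = i
--         return i - 1
--     T = collections.defaultdict(list)
--     visited = set()
--     DFN = {}
--     search(root, len(G))
--     return T, DFN
-- ===== SOURCE B (Python) =====
-- import collections
--
-- def dragon_version(G, root):
--     T = collections.defaultdict(list)
--     visited = {root}
--     finish = []
--     stack = [[root, 0]]
--     while stack:
--         n, j = stack[-1]
--         cs = G.get(n, ())
--         if j < len(cs):
--             stack[-1][1] = j + 1
--             s = cs[j]
--             if s not in visited:
--                 visited.add(s)
--                 T[n].append(s)
--                 stack.append([s, 0])
--         else:
--             finish.append(n)
--             stack.pop()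
--     DFN = {n: len(G) - k for k, n in enumerate(finish)}
--     return T, DFN
-- ===== Notes on version B (the rewrite author's own statement) =====
-- stated objective: alternative
-- what changed: A's fused recursive DFS that threads a decrementing counter through the call tree is replaced by an explicit-stack iterative DFS (per-node child indices, mark-on-push) that collects a post-order finish list, after which DFN is assigned in a separate closed-form pass (k-th finished node gets len(G)-k); same O(V+E) cost, but no recursion and no threaded counter.
import Mathlib
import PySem

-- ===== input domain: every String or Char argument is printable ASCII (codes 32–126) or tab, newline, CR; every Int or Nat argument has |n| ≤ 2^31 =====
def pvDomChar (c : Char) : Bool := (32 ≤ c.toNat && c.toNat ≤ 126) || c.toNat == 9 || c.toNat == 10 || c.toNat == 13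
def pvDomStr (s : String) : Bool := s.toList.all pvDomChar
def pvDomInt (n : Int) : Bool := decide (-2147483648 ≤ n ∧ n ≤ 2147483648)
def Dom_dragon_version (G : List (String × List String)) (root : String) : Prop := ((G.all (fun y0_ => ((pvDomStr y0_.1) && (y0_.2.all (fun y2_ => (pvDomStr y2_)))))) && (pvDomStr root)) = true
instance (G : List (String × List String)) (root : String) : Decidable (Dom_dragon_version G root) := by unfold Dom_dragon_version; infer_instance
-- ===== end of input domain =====

-- B replaces A's fused recursion-with-threaded-counter by an explicit-stack iterative DFS producing a
-- post-order finish list, then numbers the k-th finished node len(G)-k in a second pass (objective: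
-- alternative decomposition; also immune to Python's recursion limit, not claimed faster).

-- ===== PORT A =====
-- G.get(n, ()) of the Python dict G (shared by both ports: both Pythons call G.get(n, ())).
def pvChildren (G : List (String × List String)) (n : String) : List String :=
  ((PySem.Dict.mk G).get? n).getD []

-- A's recursive `search` with its inner `for s in G.get(n, ())` loop; the Nat argument is a
-- totality guard only (never reached from dragon_version's call, as the proofs show).
mutual
def searchA (G : List (String × List String)) (f : Nat) (n : String)
    (v : PySem.Set String) (T : PySem.Dict String (List String))
    (DFN : PySem.Dict String Int) (i : Int) :
    PySem.Set String × PySem.Dict String (List String) × PySem.Dict String Int × Int :=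
  match f with
  | 0 => (v, T, DFN, i)
  | f + 1 =>
    let r := forA G f n (pvChildren G n) (PySem.Set.add v n) T DFN i
    (r.1, r.2.1, (r.2.2.1).insert n r.2.2.2, r.2.2.2 - 1)
termination_by (f, 0)
decreasing_by exact Prod.Lex.left _ _ (Nat.lt_succ_self f)
def forA (G : List (String × List String)) (f : Nat) (n : String) (cs : List String)
    (v : PySem.Set String) (T : PySem.Dict String (List String))
    (DFN : PySem.Dict String Int) (i : Int) :
    PySem.Set String × PySem.Dict String (List String) × PySem.Dict String Int × Int :=
  match cs with
  | [] => (v, T, DFN, i)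
  | s :: ss =>
    if PySem.Set.contains v s then forA G f n ss v T DFN i
    else
      let r := searchA G f s v (PySem.Dict.modify T n [] (fun l => l ++ [s])) DFN i
      forA G f n ss r.1 r.2.1 r.2.2.1 r.2.2.2
termination_by (f, cs.length + 1)
decreasing_by
  · exact Prod.Lex.right _ (by simp [List.length_cons])
  · exact Prod.Lex.right _ (by simp [List.length_cons])
  · exact Prod.Lex.right _ (by simp [List.length_cons])
end

def dragon_version (G : List (String × List String)) (root : String) :
    (List (String × List String)) × (List (String × Int)) :=
  let r := searchA G ((G.flatMap Prod.snd).length + 2) root PySem.Set.empty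
      PySem.Dict.empty PySem.Dict.empty (G.length : Int)
  (r.2.1.items, r.2.2.1.items)

-- ===== PORT B =====
-- every child that can ever be looked at lies among G's value lists (used by loopB's termination)
theorem pvChildren_mem_flatMap (G : List (String × List String)) (n s : String)
    (h : s ∈ pvChildren G n) : s ∈ G.flatMap Prod.snd := by
  induction G with
  | nil => simp [pvChildren, PySem.Dict.get?] at h
  | cons p rest ih =>
    rw [pvChildren, show PySem.Dict.mk (p :: rest) = PySem.Dict.mk ((p.1, p.2) :: rest) by rfl,
      PySem.Dict.get?_mk_cons] at h
    rw [List.flatMap_cons, List.mem_append]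
    by_cases hp : (p.1 == n) = true
    · exact Or.inl (by simpa [hp] using h)
    · exact Or.inr (ih (by simpa [pvChildren, hp] using h))

theorem pvCardLt (G : List (String × List String)) (v : PySem.Set String) (s : String)
    (hs : s ∈ G.flatMap Prod.snd) (hv : PySem.Set.contains v s = false) :
    ((G.flatMap Prod.snd).toFinset \ (PySem.Set.add v s).toFinset).card
      < ((G.flatMap Prod.snd).toFinset \ v.toFinset).card := by
  have hsv : s ∉ v := fun h => by
    have hc := (PySem.Set.contains_iff v s).2 h
    rw [hv] at hc
    cases hc
  apply Finset.card_lt_card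
  constructor
  · intro x hx
    simp only [Finset.mem_sdiff, List.mem_toFinset] at hx ⊢
    exact ⟨hx.1, fun hm => hx.2 ((PySem.Set.mem_add v s x).2 (Or.inl hm))⟩
  · intro hsub
    have h1 : s ∈ (G.flatMap Prod.snd).toFinset \ v.toFinset := by
      simp only [Finset.mem_sdiff, List.mem_toFinset]; exact ⟨hs, hsv⟩
    have h2 := hsub h1
    simp only [Finset.mem_sdiff, List.mem_toFinset] at h2
    exact h2.2 ((PySem.Set.mem_add v s s).2 (Or.inr rfl))

-- frame weight for loopB's termination
def pvW (G : List (String × List String)) (p : String × Nat) : Nat :=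
  (pvChildren G p.1).length + 1 - min p.2 (pvChildren G p.1).length

-- Source B's while-loop: stack of (node, next-child-index) pairs, head = top of stack
def loopB (G : List (String × List String)) (stk : List (String × Nat))
    (v : PySem.Set String) (T : PySem.Dict String (List String)) (fin : List String) :
    PySem.Set String × PySem.Dict String (List String) × List String :=
  match stk with
  | [] => (v, T, fin)
  | (n, j) :: stk' =>
    if h : j < (pvChildren G n).length then
      if PySem.Set.contains v ((pvChildren G n)[j]) then
        loopB G ((n, j + 1) :: stk') v T fin
      else
        loopB G (((pvChildren G n)[j], 0) :: (n, j + 1) :: stk')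
          (PySem.Set.add v ((pvChildren G n)[j]))
          (PySem.Dict.modify T n [] (fun l => l ++ [(pvChildren G n)[j]])) fin
    else
      loopB G stk' v T (fin ++ [n])
termination_by (((G.flatMap Prod.snd).toFinset \ v.toFinset).card, (stk.map (pvW G)).sum)
decreasing_by
  · apply Prod.Lex.right
    simp only [List.map_cons, List.sum_cons, pvW]
    omega
  · apply Prod.Lex.left
    exact pvCardLt G v _ (pvChildren_mem_flatMap G n _ (List.getElem_mem h))
      (Bool.not_eq_true _ ▸ by assumption)
  · apply Prod.Lex.right
    simp only [List.map_cons, List.sum_cons, pvW]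
    omega

def dragon_version_alt (G : List (String × List String)) (root : String) :
    (List (String × List String)) × (List (String × Int)) :=
  let r := loopB G [(root, 0)] (PySem.Set.add PySem.Set.empty root) PySem.Dict.empty []
  let DFN := (PySem.List.enumerate r.2.2 0).foldl
      (fun d p => d.insert p.2 ((G.length : Int) - p.1)) PySem.Dict.empty
  (r.2.1.items, DFN.items)

-- ===== PRECONDITION & SPEC =====
def Spec_dragon_version (G : List (String × List String)) (root : String) (out : (List (String × List String)) × (List (String × Int))) : Prop := out = dragon_version_alt G root
instance (G : List (String × List String)) (root : String) (out : (List (String × List String)) × (List (String × Int))) : Decidable (Spec_dragon_version G root out) := by unfold Spec_dragon_version; infer_instance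

-- ===== CLAIM (what is proved, stated in full; the proofs are below) =====
def Claim_equal_dragon_version : Prop := ∀ (G : List (String × List String)) (root : String), Dom_dragon_version G root → Spec_dragon_version G root (dragon_version G root)

-- ===== LEMMAS AND PROOFS =====

-- the numbering B assigns to a finish list: k-th finished node ↦ len(G) - k
def pvNum (G : List (String × List String)) (l : List String) : List (String × Int) :=
  (PySem.List.enumerate l 0).map (fun p => (p.2, (G.length : Int) - p.1))

theorem pvNum_append (G : List (String × List String)) (l : List String) (x : String) :
    pvNum G (l ++ [x]) = pvNum G l ++ [(x, (G.length : Int) - l.length)] := by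
  rw [pvNum, PySem.List.enumerate_append]
  simp [pvNum, PySem.List.enumerate_cons, PySem.List.enumerate_nil]

theorem pvCardMono (G : List (String × List String)) (v v' : PySem.Set String)
    (h : ∀ x ∈ v, x ∈ v') :
    ((G.flatMap Prod.snd).toFinset \ v'.toFinset).card
      ≤ ((G.flatMap Prod.snd).toFinset \ v.toFinset).card := by
  apply Finset.card_le_card
  intro x hx
  simp only [Finset.mem_sdiff, List.mem_toFinset] at hx ⊢
  exact ⟨hx.1, fun hm => hx.2 (h x hm)⟩

theorem pvKeysLen {κ ν : Type} (d : PySem.Dict κ ν) : d.keys.length = d.size := by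
  simp [PySem.Dict.keys, PySem.Dict.size]

-- post-conditions of A's child loop used through the simulation
def pvPost (G : List (String × List String)) (v : PySem.Set String)
    (DFN : PySem.Dict String Int)
    (r : PySem.Set String × PySem.Dict String (List String) × PySem.Dict String Int × Int) : Prop :=
  (∀ x ∈ v, x ∈ r.1) ∧
  (∀ k ∈ r.2.2.1.keys, k ∈ DFN.keys ∨ (k ∉ v ∧ k ∈ r.1)) ∧
  r.2.2.2 = (G.length : Int) - r.2.2.1.size ∧
  r.2.2.1.keys.Nodup ∧
  (DFN.items = pvNum G DFN.keys → r.2.2.1.items = pvNum G r.2.2.1.keys)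

theorem pvBridge (G : List (String × List String)) (f j : Nat) (n : String)
    (v : PySem.Set String) (T : PySem.Dict String (List String))
    (DFN : PySem.Dict String Int) (i : Int) (stk : List (String × Nat))
    (hfuel : ((G.flatMap Prod.snd).toFinset \ v.toFinset).card < f)
    (hnv : n ∈ v)
    (hkeys : ∀ k ∈ DFN.keys, k ∈ v)
    (hn : n ∉ DFN.keys)
    (hnd : DFN.keys.Nodup)
    (hi : i = (G.length : Int) - DFN.size)
    (r : PySem.Set String × PySem.Dict String (List String) × PySem.Dict String Int × Int)
    (hr : r = forA G f n ((pvChildren G n).drop j) v T DFN i) :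
    loopB G ((n, j) :: stk) v T DFN.keys
      = loopB G stk r.1 r.2.1 ((r.2.2.1.insert n r.2.2.2).keys) ∧ pvPost G v DFN r := by
  by_cases hj : j < (pvChildren G n).length
  · have hdrop : (pvChildren G n).drop j
        = (pvChildren G n)[j] :: (pvChildren G n).drop (j + 1) := List.drop_eq_getElem_cons hj
    by_cases hs : PySem.Set.contains v ((pvChildren G n)[j]) = true
    · -- child already visited: A's loop skips it, B bumps the index
      have hres : forA G f n ((pvChildren G n).drop j) v T DFN i
          = forA G f n ((pvChildren G n).drop (j + 1)) v T DFN i := by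
        rw [hdrop]; simp only [forA, hs, if_true]
      obtain ⟨C1, CP⟩ := pvBridge G f (j + 1) n v T DFN i stk hfuel hnv hkeys hn hnd hi r
        (hr.trans hres)
      refine ⟨?_, CP⟩
      rw [← C1]
      conv_lhs => rw [loopB]
      simp only [hj, dif_pos, hs, if_true]
    · -- new child: B pushes it; A recurses into `search`
      have hsF : PySem.Set.contains v ((pvChildren G n)[j]) = false := by
        cases hc : PySem.Set.contains v ((pvChildren G n)[j])
        · rfl
        · exact absurd hc hs
      have hsU : (pvChildren G n)[j] ∈ G.flatMap Prod.snd :=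
        pvChildren_mem_flatMap G n _ (List.getElem_mem hj)
      have hsv : (pvChildren G n)[j] ∉ v := fun h => hs ((PySem.Set.contains_iff v _).2 h)
      have hcard := pvCardLt G v _ hsU hsF
      have hf1 : f = (f - 1) + 1 := by omega
      have hfc : ((G.flatMap Prod.snd).toFinset
          \ (PySem.Set.add v ((pvChildren G n)[j])).toFinset).card < f - 1 := by omega
      obtain ⟨C1c, M1c, K1c, I1c, N1c, H1c⟩ := pvBridge G (f - 1) 0 ((pvChildren G n)[j])
        (PySem.Set.add v ((pvChildren G n)[j]))
        (PySem.Dict.modify T n [] (fun l => l ++ [(pvChildren G n)[j]])) DFN i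
        ((n, j + 1) :: stk) hfc
        ((PySem.Set.mem_add v _ _).2 (Or.inr rfl))
        (fun k hk => (PySem.Set.mem_add v _ k).2 (Or.inl (hkeys k hk)))
        (fun hk => hsv (hkeys _ hk)) hnd hi _ rfl
      set rc := forA G (f - 1) ((pvChildren G n)[j])
        ((pvChildren G ((pvChildren G n)[j])).drop 0)
        (PySem.Set.add v ((pvChildren G n)[j]))
        (PySem.Dict.modify T n [] (fun l => l ++ [(pvChildren G n)[j]])) DFN i with hrc
      have hS : searchA G f ((pvChildren G n)[j]) v
          (PySem.Dict.modify T n [] (fun l => l ++ [(pvChildren G n)[j]])) DFN i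
          = (rc.1, rc.2.1, rc.2.2.1.insert ((pvChildren G n)[j]) rc.2.2.2, rc.2.2.2 - 1) := by
        conv_lhs => rw [hf1]
        simp only [searchA]
        rw [hrc, List.drop_zero]
      have hsK : (pvChildren G n)[j] ∉ rc.2.2.1.keys := fun hk => by
        rcases K1c _ hk with h1 | h2
        · exact hsv (hkeys _ h1)
        · exact h2.1 ((PySem.Set.mem_add v _ _).2 (Or.inr rfl))
      have hsC : rc.2.2.1.contains ((pvChildren G n)[j]) = false := by
        cases hc : rc.2.2.1.contains ((pvChildren G n)[j])
        · rfl
        · exact absurd ((PySem.Dict.contains_iff_mem_keys _ _).1 hc) hsK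
      have hDk : (rc.2.2.1.insert ((pvChildren G n)[j]) rc.2.2.2).keys
          = rc.2.2.1.keys ++ [(pvChildren G n)[j]] :=
        PySem.Dict.keys_insert_of_not_contains _ _ hsC
      have hDi : (rc.2.2.1.insert ((pvChildren G n)[j]) rc.2.2.2).items
          = rc.2.2.1.items ++ [((pvChildren G n)[j], rc.2.2.2)] :=
        PySem.Dict.items_insert_of_not_contains _ _ hsC
      have hDs : (rc.2.2.1.insert ((pvChildren G n)[j]) rc.2.2.2).size = rc.2.2.1.size + 1 := by
        rw [PySem.Dict.size_insert, if_neg (by simp [hsC])]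
      have hDnd : (rc.2.2.1.insert ((pvChildren G n)[j]) rc.2.2.2).keys.Nodup := by
        rw [hDk, List.nodup_append]
        refine ⟨N1c, List.nodup_singleton _, ?_⟩
        intro a ha b hb
        rw [List.mem_singleton] at hb
        subst hb
        exact fun h => hsK (h ▸ ha)
      have hfu2 : ((G.flatMap Prod.snd).toFinset \ rc.1.toFinset).card < f := by
        have := pvCardMono G _ _ M1c
        omega
      have hnv2 : n ∈ rc.1 := M1c n ((PySem.Set.mem_add v _ n).2 (Or.inl hnv))
      have hkeys2 : ∀ k ∈ (rc.2.2.1.insert ((pvChildren G n)[j]) rc.2.2.2).keys, k ∈ rc.1 := by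
        rw [hDk]
        intro k hk
        rcases List.mem_append.1 hk with hk | hk
        · rcases K1c k hk with h1 | h2
          · exact M1c k ((PySem.Set.mem_add v _ k).2 (Or.inl (hkeys k h1)))
          · exact h2.2
        · rw [List.mem_singleton] at hk
          exact hk ▸ M1c _ ((PySem.Set.mem_add v _ _).2 (Or.inr rfl))
      have hn2 : n ∉ (rc.2.2.1.insert ((pvChildren G n)[j]) rc.2.2.2).keys := by
        rw [hDk]
        intro hk
        rcases List.mem_append.1 hk with hk | hk
        · rcases K1c n hk with h1 | h2
          · exact hn h1
          · exact h2.1 ((PySem.Set.mem_add v _ n).2 (Or.inl hnv))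
        · rw [List.mem_singleton] at hk
          exact hsv (hk ▸ hnv)
      have hi2 : rc.2.2.2 - 1
          = (G.length : Int) - (rc.2.2.1.insert ((pvChildren G n)[j]) rc.2.2.2).size := by
        rw [hDs, I1c]
        push_cast
        ring
      obtain ⟨C12, M12, K12, I12, N12, H12⟩ := pvBridge G f (j + 1) n rc.1 rc.2.1
        (rc.2.2.1.insert ((pvChildren G n)[j]) rc.2.2.2) (rc.2.2.2 - 1) stk hfu2 hnv2 hkeys2
        hn2 hDnd hi2 _ rfl
      have hres : forA G f n ((pvChildren G n).drop j) v T DFN i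
          = forA G f n ((pvChildren G n).drop (j + 1)) rc.1 rc.2.1
              (rc.2.2.1.insert ((pvChildren G n)[j]) rc.2.2.2) (rc.2.2.2 - 1) := by
        rw [hdrop]
        simp only [forA, hsF, Bool.false_eq_true, if_false]
        rw [hS]
      rw [hr, hres]
      constructor
      · calc loopB G ((n, j) :: stk) v T DFN.keys
            = loopB G (((pvChildren G n)[j], 0) :: (n, j + 1) :: stk)
                (PySem.Set.add v ((pvChildren G n)[j]))
                (PySem.Dict.modify T n [] (fun l => l ++ [(pvChildren G n)[j]])) DFN.keys := by
              conv_lhs => rw [loopB]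
              simp only [hj, dif_pos, hsF, Bool.false_eq_true, if_false]
          _ = loopB G ((n, j + 1) :: stk) rc.1 rc.2.1
                ((rc.2.2.1.insert ((pvChildren G n)[j]) rc.2.2.2).keys) := C1c
          _ = _ := C12
      · refine ⟨?_, ?_, I12, N12, ?_⟩
        · exact fun x hx => M12 x (M1c x ((PySem.Set.mem_add v _ x).2 (Or.inl hx)))
        · intro k hk
          rcases K12 k hk with h1 | h2
          · rw [hDk] at h1
            rcases List.mem_append.1 h1 with h1 | h1
            · rcases K1c k h1 with h3 | h4
              · exact Or.inl h3
              · exact Or.inr ⟨fun hkv => h4.1 ((PySem.Set.mem_add v _ k).2 (Or.inl hkv)),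
                  M12 k h4.2⟩
            · rw [List.mem_singleton] at h1
              subst h1
              exact Or.inr ⟨hsv, M12 _ (M1c _ ((PySem.Set.mem_add v _ _).2 (Or.inr rfl)))⟩
          · exact Or.inr ⟨fun hkv => h2.1 (M1c k ((PySem.Set.mem_add v _ k).2 (Or.inl hkv))),
              h2.2⟩
        · intro hH
          apply H12
          rw [hDi, hDk, H1c hH, I1c, ← pvKeysLen, pvNum_append]
  · -- children exhausted: A records DFN[n], B pops and appends n to the finish list
    have hdrop : (pvChildren G n).drop j = [] := List.drop_eq_nil_of_le (Nat.le_of_not_lt hj)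
    have hres : forA G f n ((pvChildren G n).drop j) v T DFN i = (v, T, DFN, i) := by
      rw [hdrop]; simp only [forA]
    have hnC : DFN.contains n = false := by
      cases hc : DFN.contains n
      · rfl
      · exact absurd ((PySem.Dict.contains_iff_mem_keys DFN n).1 hc) hn
    rw [hr, hres]
    refine ⟨?_, fun x hx => hx, fun k hk => Or.inl hk, hi, hnd, fun h => h⟩
    conv_lhs => rw [loopB]
    simp only [hj, dite_false]
    rw [PySem.Dict.keys_insert_of_not_contains _ _ hnC]
termination_by (f, (pvChildren G n).length - j)
decreasing_by
  · exact Prod.Lex.right _ (by omega)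
  · exact Prod.Lex.left _ _ (by omega)
  · exact Prod.Lex.right _ (by omega)

theorem pvEmptyNum (G : List (String × List String)) :
    (PySem.Dict.empty : PySem.Dict String Int).items
      = pvNum G (PySem.Dict.empty : PySem.Dict String Int).keys := by
  simp [pvNum, PySem.Dict.keys_empty, PySem.List.enumerate_nil]
  rfl

-- ===== VERDICT (by name: the statement is the Claim_ definition above) =====
theorem dragon_version_spec : Claim_equal_dragon_version := by
  unfold Claim_equal_dragon_version Spec_dragon_version
  intro G root _
  have hroot : root ∈ PySem.Set.add PySem.Set.empty root :=
    (PySem.Set.mem_add _ _ _).2 (Or.inr rfl)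
  have hfuel : ((G.flatMap Prod.snd).toFinset
      \ (PySem.Set.add PySem.Set.empty root).toFinset).card
      < (G.flatMap Prod.snd).length + 1 := by
    have h1 := Finset.card_le_card (Finset.sdiff_subset
      (s := (G.flatMap Prod.snd).toFinset)
      (t := (PySem.Set.add PySem.Set.empty root).toFinset))
    have h2 := List.toFinset_card_le (G.flatMap Prod.snd)
    omega
  obtain ⟨C1, M, K, I, N, H⟩ := pvBridge G ((G.flatMap Prod.snd).length + 1) 0 root
    (PySem.Set.add PySem.Set.empty root) PySem.Dict.empty PySem.Dict.empty
    (G.length : Int) [] hfuel hroot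
    (fun k hk => absurd hk (by simp [PySem.Dict.keys_empty]))
    (by simp [PySem.Dict.keys_empty])
    (by simp [PySem.Dict.keys_empty])
    (by simp [PySem.Dict.size_empty]) _ rfl
  set r1 := forA G ((G.flatMap Prod.snd).length + 1) root ((pvChildren G root).drop 0)
    (PySem.Set.add PySem.Set.empty root) PySem.Dict.empty PySem.Dict.empty
    (G.length : Int) with hr1
  have hrootK : root ∉ r1.2.2.1.keys := fun hk => by
    rcases K root hk with h | h
    · simp [PySem.Dict.keys_empty] at h
    · exact h.1 hroot
  have hrootC : r1.2.2.1.contains root = false := by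
    cases hc : r1.2.2.1.contains root
    · rfl
    · exact absurd ((PySem.Dict.contains_iff_mem_keys _ _).1 hc) hrootK
  have hDk : (r1.2.2.1.insert root r1.2.2.2).keys = r1.2.2.1.keys ++ [root] :=
    PySem.Dict.keys_insert_of_not_contains _ _ hrootC
  have hDi : (r1.2.2.1.insert root r1.2.2.2).items = r1.2.2.1.items ++ [(root, r1.2.2.2)] :=
    PySem.Dict.items_insert_of_not_contains _ _ hrootC
  have hDnum : (r1.2.2.1.insert root r1.2.2.2).items
      = pvNum G (r1.2.2.1.insert root r1.2.2.2).keys := by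
    rw [hDi, hDk, H (pvEmptyNum G), I, ← pvKeysLen, pvNum_append]
  have hDnd : (r1.2.2.1.insert root r1.2.2.2).keys.Nodup := by
    rw [hDk, List.nodup_append]
    refine ⟨N, List.nodup_singleton _, ?_⟩
    intro a ha b hb
    rw [List.mem_singleton] at hb
    subst hb
    exact fun h => hrootK (h ▸ ha)
  have hA : searchA G ((G.flatMap Prod.snd).length + 2) root PySem.Set.empty
      PySem.Dict.empty PySem.Dict.empty (G.length : Int)
      = (r1.1, r1.2.1, r1.2.2.1.insert root r1.2.2.2, r1.2.2.2 - 1) := by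
    simp only [searchA]
    rw [hr1, List.drop_zero]
  simp only [PySem.Dict.keys_empty] at C1
  have hB : ((PySem.List.enumerate (r1.2.2.1.insert root r1.2.2.2).keys 0).foldl
      (fun d p => d.insert p.2 ((G.length : Int) - p.1))
      (PySem.Dict.empty : PySem.Dict String Int)).items
      = pvNum G (r1.2.2.1.insert root r1.2.2.2).keys := by
    rw [PySem.Dict.items_foldl_insert_fresh
      (PySem.List.enumerate (r1.2.2.1.insert root r1.2.2.2).keys 0)
      (fun p => p.2) (fun p => (G.length : Int) - p.1) PySem.Dict.empty
      (fun a _ => PySem.Dict.contains_empty _)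
      (by rw [PySem.List.map_snd_enumerate]; exact hDnd)]
    rw [pvNum, show (PySem.Dict.empty : PySem.Dict String Int).items = [] from rfl,
      List.nil_append]
  simp only [dragon_version, dragon_version_alt, hA, C1]
  rw [loopB]
  simp only [hB, hDnum]
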